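-- pv_equiv track=rewrite | github.com/SiddhantAttavar/Mini-Projects | Python/Marble Game.py | solve
-- ===== SOURCE A (Python) =====
-- def checkWin(marbles):
--     possibleSums = {0}
--     for marble in marbles:
--         possibleSums = possibleSums.union(set([marble + x for x in possibleSums]))
--         if finalSum in possibleSums:
--             return True
--     return False
--
-- def gameState(marbles):
--     playerA = []
--     playerB = []
--
--     for marble, player in enumerate(marbles):
--         if player == 0:
--             playerA.append(marble + 1)
--         else:
--             playerB.append(marble + 1)
--
--     if checkWin(playerA):
--         return 1
--     if checkWin(playerB):
--         return -1
--     return 0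
--
-- def solve(marbles, turn, depth):
--     if depth == len(marbles):
--         # We have reached the end of the game
--         return gameState(marbles)
--
--     # Maximize score
--     res = -2
--     for marble, player in enumerate(marbles):
--         if player == -1:
--             # We can take this marble
--             nextMarbles = marbles.copy()
--             nextMarbles[marble] = 1
--             res = max(res, -solve(nextMarbles, (turn + 1) % 2, depth + 1))
--
--     return res
--
-- finalSum = 15
-- ===== SOURCE B (Python) =====
-- finalSum = 15
--
-- def checkWin(vals):
--     # subset-sum DP; sums above the target can never shrink back, so drop them
--     sums = {0}
--     for v in vals:
--         sums |= {v + x for x in sums if v + x <= finalSum}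
--     return finalSum in sums
--
-- def gameState(board):
--     playerA = [i + 1 for i, p in enumerate(board) if p == 0]
--     playerB = [i + 1 for i, p in enumerate(board) if p != 0]
--     if checkWin(playerA):
--         return 1
--     if checkWin(playerB):
--         return -1
--     return 0
--
-- def solve(marbles, turn, depth):
--     # minimax with a transposition table: many move orders reach the same board,
--     # memoizing by (board, depth) evaluates each reachable board state once
--     cache = {}
--
--     def go(board, depth):
--         if depth == len(board):
--             return gameState(board)
--         key = (tuple(board), depth)
--         if key not in cache:
--             res = -2
--             for i, p in enumerate(board):
--                 if p == -1:
--                     child = board.copy()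
--                     child[i] = 1
--                     res = max(res, -go(child, depth + 1))
--             cache[key] = res
--         return cache[key]
--
--     return go(list(marbles), depth)
-- ===== Notes on version B (the rewrite author's own statement) =====
-- stated objective: alternative
-- what changed: Restructures the minimax as a memoized recursion over a transposition table keyed by (board, depth), with checkWin rewritten as a bounded subset-sum DP that keeps only sums <= finalSum instead of the unbounded achievable-sum set.
import Mathlib
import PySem

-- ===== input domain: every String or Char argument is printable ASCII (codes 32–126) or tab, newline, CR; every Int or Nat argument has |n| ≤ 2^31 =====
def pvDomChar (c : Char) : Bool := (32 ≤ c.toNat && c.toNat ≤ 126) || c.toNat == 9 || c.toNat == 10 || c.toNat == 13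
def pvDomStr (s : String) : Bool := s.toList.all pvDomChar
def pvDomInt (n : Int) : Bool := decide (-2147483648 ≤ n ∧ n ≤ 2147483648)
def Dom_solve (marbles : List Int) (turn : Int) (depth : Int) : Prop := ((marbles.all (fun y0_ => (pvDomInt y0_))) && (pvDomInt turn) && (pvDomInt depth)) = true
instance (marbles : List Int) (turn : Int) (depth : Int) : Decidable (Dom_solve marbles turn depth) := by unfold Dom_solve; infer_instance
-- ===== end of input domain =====

-- B restructures the minimax as a memoized recursion over a transposition table
-- keyed by (board, depth), with a bounded subset-sum DP checkWin (alternative algorithm).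

-- ===== PORT A =====
def finalSum : Int := 15

-- A's checkWin: early-returning loop growing the set of achievable subset sums.
def checkWinLoop : List Int → PySem.Set Int → Bool
  | [], _ => false
  | m :: rest, s =>
    let s' := PySem.Set.union s (PySem.Set.ofList (s.map (fun x => m + x)))
    if finalSum ∈ s' then true else checkWinLoop rest s'

def checkWin (marbles : List Int) : Bool :=
  checkWinLoop marbles (PySem.Set.ofList [0])

def gameState (marbles : List Int) : Int :=
  let p := (PySem.List.enumerate marbles).foldl
    (fun (ab : List Int × List Int) mp =>
      if mp.2 = 0 then (ab.1 ++ [mp.1 + 1], ab.2) else (ab.1, ab.2 ++ [mp.1 + 1]))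
    ([], [])
  if checkWin p.1 then 1 else if checkWin p.2 then -1 else 0

-- fuel = number of -1 entries; each recursive call fills one -1 slot, so fuel suffices
-- and the `0 => 0` branch is unreachable (pure totality device).
def solveF (fuel : Nat) (marbles : List Int) (turn : Int) (depth : Int) : Int :=
  if depth = (marbles.length : Int) then gameState marbles
  else
    (PySem.List.enumerate marbles).foldl
      (fun res mp =>
        if mp.2 = -1 then
          max res (-(match fuel with
            | 0 => 0
            | f + 1 => solveF f (PySem.List.pySetD marbles mp.1 1) (PySem.Int.mod (turn + 1) 2) (depth + 1)))
        else res)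
      (-2)

def solve (marbles : List Int) (turn : Int) (depth : Int) : Int :=
  solveF (marbles.count (-1)) marbles turn depth

-- ===== PORT B =====
-- B's checkWin: subset-sum DP keeping only sums ≤ finalSum.
def checkWinAlt (vals : List Int) : Bool :=
  let sums := vals.foldl
    (fun s v => PySem.Set.union s
      (PySem.Set.ofList ((s.filter (fun x => v + x ≤ finalSum)).map (fun x => v + x))))
    (PySem.Set.ofList [0])
  finalSum ∈ sums

-- B's leaf evaluation (gameState with comprehensions and the DP checkWin).
def gameStateAlt (board : List Int) : Int :=
  let playerA := (PySem.List.enumerate board).filterMap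
    (fun mp => if mp.2 = 0 then some (mp.1 + 1) else none)
  let playerB := (PySem.List.enumerate board).filterMap
    (fun mp => if mp.2 ≠ 0 then some (mp.1 + 1) else none)
  if checkWinAlt playerA then 1 else if checkWinAlt playerB then -1 else 0

-- B's memoized minimax `go`, state-passing the cache (Python's dict keyed by
-- (tuple(board), depth)); fuel = number of -1 entries (each call fills one slot,
-- so fuel suffices; the `0 => 0` branch is an unreachable totality device).
def goF (fuel : Nat) (board : List Int) (depth : Int)
    (cache : PySem.Dict (List Int × Int) Int) :
    Int × PySem.Dict (List Int × Int) Int :=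
  if depth = (board.length : Int) then (gameStateAlt board, cache)
  else
    match PySem.Dict.get? cache (board, depth) with
    | some v => (v, cache)
    | none =>
      let st := (PySem.List.enumerate board).foldl
        (fun (st : Int × PySem.Dict (List Int × Int) Int) mp =>
          if mp.2 = -1 then
            let r := (match fuel with
              | 0 => ((0 : Int), st.2)
              | f + 1 => goF f (PySem.List.pySetD board mp.1 1) (depth + 1) st.2)
            (max st.1 (-r.1), r.2)
          else st)
        (-2, cache)
      (st.1, PySem.Dict.insert st.2 (board, depth) st.1)
termination_by fuel

def solve_alt (marbles : List Int) (turn : Int) (depth : Int) : Int :=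
  (goF (marbles.count (-1)) marbles depth PySem.Dict.empty).1

-- ===== PRECONDITION & SPEC =====
def Spec_solve (marbles : List Int) (turn : Int) (depth : Int) (out : Int) : Prop := out = solve_alt marbles turn depth
instance (marbles : List Int) (turn : Int) (depth : Int) (out : Int) : Decidable (Spec_solve marbles turn depth out) := by unfold Spec_solve; infer_instance

-- ===== CLAIM (what is proved, stated in full; the proofs are below) =====
def Claim_equal_solve : Prop := ∀ (marbles : List Int) (turn : Int) (depth : Int), Dom_solve marbles turn depth → Spec_solve marbles turn depth (solve marbles turn depth)


-- ===== LEMMAS AND PROOFS =====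

-- player lists as filterMaps over the enumeration
def aListP (l : List Int) : List Int :=
  (PySem.List.enumerate l).filterMap (fun mp => if mp.2 = 0 then some (mp.1 + 1) else none)
def bListP (l : List Int) : List Int :=
  (PySem.List.enumerate l).filterMap (fun mp => if mp.2 ≠ 0 then some (mp.1 + 1) else none)

theorem pairfold (l : List (Int × Int)) (a b : List Int) :
    l.foldl (fun (ab : List Int × List Int) mp =>
      if mp.2 = 0 then (ab.1 ++ [mp.1 + 1], ab.2) else (ab.1, ab.2 ++ [mp.1 + 1])) (a, b)
    = (a ++ l.filterMap (fun mp => if mp.2 = 0 then some (mp.1 + 1) else none),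
       b ++ l.filterMap (fun mp => if mp.2 ≠ 0 then some (mp.1 + 1) else none)) := by
  induction l generalizing a b with
  | nil => simp
  | cons mp rest ih =>
    by_cases h : mp.2 = 0 <;> simp [h, ih, List.append_assoc]

-- A's set evolution without the early return
def setsA (l : List Int) (s : PySem.Set Int) : PySem.Set Int :=
  l.foldl (fun s m => PySem.Set.union s (PySem.Set.ofList (s.map (fun x => m + x)))) s

theorem mem_setsA_mono (l : List Int) (s : PySem.Set Int) (x : Int) (hx : x ∈ s) :
    x ∈ setsA l s := by
  induction l generalizing s with
  | nil => exact hx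
  | cons m rest ih =>
    exact ih _ (by simp [PySem.Set.mem_union, hx])

theorem checkWinLoop_eq (l : List Int) (s : PySem.Set Int) (h15 : finalSum ∉ s) :
    checkWinLoop l s = decide (finalSum ∈ setsA l s) := by
  induction l generalizing s with
  | nil =>
    simp only [checkWinLoop, setsA, List.foldl_nil]
    simp [h15]
  | cons m rest ih =>
    rw [checkWinLoop]
    have hsa : setsA (m :: rest) s
        = setsA rest (PySem.Set.union s (PySem.Set.ofList (s.map (fun x => m + x)))) := by
      simp [setsA]
    by_cases h : finalSum ∈ PySem.Set.union s (PySem.Set.ofList (s.map (fun x => m + x)))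
    · rw [if_pos h, hsa]
      have : finalSum ∈ setsA rest (PySem.Set.union s (PySem.Set.ofList (s.map (fun x => m + x)))) :=
        mem_setsA_mono _ _ _ h
      simp [this]
    · rw [if_neg h, hsa, ih _ h]

-- B's set evolution (sums capped at finalSum)
def setsB (l : List Int) (s : PySem.Set Int) : PySem.Set Int :=
  l.foldl (fun s v => PySem.Set.union s
    (PySem.Set.ofList ((s.filter (fun x => v + x ≤ finalSum)).map (fun x => v + x)))) s

theorem mem_setsB (l : List Int) (hl : ∀ v ∈ l, 1 ≤ v) : ∀ (s1 s2 : PySem.Set Int),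
    (∀ z : Int, z ∈ s2 ↔ z ∈ s1 ∧ z ≤ finalSum) →
    ∀ z : Int, z ∈ setsB l s2 ↔ z ∈ setsA l s1 ∧ z ≤ finalSum := by
  induction l with
  | nil => intro s1 s2 hinv; exact hinv
  | cons v rest ih =>
    intro s1 s2 hinv
    have hv : 1 ≤ v := hl v (by simp)
    refine ih (fun w hw => hl w (by simp [hw])) _ _ ?_
    intro z
    simp only [PySem.Set.mem_union, PySem.Set.mem_ofList, List.mem_map, List.mem_filter,
      decide_eq_true_eq]
    constructor
    · rintro (hz | ⟨x, ⟨hx, hxle⟩, rfl⟩)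
      · rcases (hinv z).1 hz with ⟨h1, h2⟩
        exact ⟨Or.inl h1, h2⟩
      · rcases (hinv x).1 hx with ⟨h1, _⟩
        exact ⟨Or.inr ⟨x, h1, rfl⟩, hxle⟩
    · rintro ⟨hz | ⟨x, hx, rfl⟩, hle⟩
      · exact Or.inl ((hinv z).2 ⟨hz, hle⟩)
      · refine Or.inr ⟨x, ⟨(hinv x).2 ⟨hx, ?_⟩, hle⟩, rfl⟩
        simp only [finalSum] at hle ⊢
        omega

theorem checkWin_eq_alt (l : List Int) (hl : ∀ v ∈ l, 1 ≤ v) :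
    checkWin l = checkWinAlt l := by
  have h0 : finalSum ∉ (PySem.Set.ofList [(0 : Int)]) := by decide
  have hinv : ∀ z : Int, z ∈ (PySem.Set.ofList [(0 : Int)]) ↔
      z ∈ (PySem.Set.ofList [(0 : Int)]) ∧ z ≤ finalSum := by
    intro z
    constructor
    · intro h
      refine ⟨h, ?_⟩
      rw [PySem.Set.mem_ofList] at h
      simp only [List.mem_singleton] at h
      rw [h]; decide
    · exact fun h => h.1
  have key := mem_setsB l hl (PySem.Set.ofList [(0 : Int)]) (PySem.Set.ofList [(0 : Int)]) hinv finalSum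
  rw [checkWin, checkWinLoop_eq l _ h0]
  have halt : checkWinAlt l = decide (finalSum ∈ setsB l (PySem.Set.ofList [(0 : Int)])) := rfl
  rw [halt, decide_eq_decide]
  exact ⟨fun h => key.2 ⟨h, le_refl _⟩, fun h => (key.1 h).1⟩

-- the common terminal value (B's leaf evaluation, named for the proofs)
def gVal (l : List Int) : Int :=
  if checkWinAlt (aListP l) then 1 else if checkWinAlt (bListP l) then -1 else 0

theorem gameStateAlt_eq_gVal (l : List Int) : gameStateAlt l = gVal l := rfl

theorem gameState_eq (l : List Int) :
    gameState l = gVal l := by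
  have ha : ∀ v ∈ aListP l, 1 ≤ v := by
    intro v hv
    simp only [aListP, List.mem_filterMap] at hv
    rcases hv with ⟨mp, hmp, hF⟩
    rcases (PySem.List.mem_enumerate_iff _ _ _).1 hmp with ⟨k, hk, rfl⟩
    split_ifs at hF
    simp only [Option.some.injEq] at hF
    omega
  have hb : ∀ v ∈ bListP l, 1 ≤ v := by
    intro v hv
    simp only [bListP, List.mem_filterMap] at hv
    rcases hv with ⟨mp, hmp, hF⟩
    rcases (PySem.List.mem_enumerate_iff _ _ _).1 hmp with ⟨k, hk, rfl⟩
    split_ifs at hF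
    simp only [Option.some.injEq] at hF
    omega
  have ea : (PySem.List.enumerate l).filterMap
      (fun mp => if mp.2 = 0 then some (mp.1 + 1) else none) = aListP l := rfl
  have eb : (PySem.List.enumerate l).filterMap
      (fun mp => if mp.2 ≠ 0 then some (mp.1 + 1) else none) = bListP l := rfl
  simp only [gameState, pairfold, List.nil_append, ea, eb]
  rw [checkWin_eq_alt _ ha, checkWin_eq_alt _ hb, gVal]

-- invariance of the player lists under filling a -1 slot with 1
theorem enumFM_set (F : Int × Int → Option Int) (hF : ∀ j : Int, F (j, -1) = F (j, 1)) :
    ∀ (l : List Int) (i : Nat) (s : Int), l[i]? = some (-1) →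
      (PySem.List.enumerate (l.set i 1) s).filterMap F = (PySem.List.enumerate l s).filterMap F := by
  intro l
  induction l with
  | nil => intro i s h; simp at h
  | cons x rest ih =>
    intro i s h
    cases i with
    | zero =>
      simp only [List.getElem?_cons_zero, Option.some.injEq] at h
      subst h
      simp [PySem.List.enumerate_cons, List.filterMap_cons, hF s]
    | succ i =>
      simp only [List.getElem?_cons_succ] at h
      show ((PySem.List.enumerate (x :: rest.set i 1) s).filterMap F) = _
      simp [PySem.List.enumerate_cons, List.filterMap_cons, ih i (s + 1) h]

theorem aListP_set (l : List Int) (i : Nat) (h : l[i]? = some (-1)) :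
    aListP (l.set i 1) = aListP l :=
  enumFM_set _ (fun j => by norm_num) l i 0 h

theorem bListP_set (l : List Int) (i : Nat) (h : l[i]? = some (-1)) :
    bListP (l.set i 1) = bListP l :=
  enumFM_set _ (fun j => by norm_num) l i 0 h

theorem count_set_neg1 (l : List Int) (i : Nat) (h : l[i]? = some (-1)) :
    (l.set i 1).count (-1) + 1 = l.count (-1) := by
  induction l generalizing i with
  | nil => simp at h
  | cons x rest ih =>
    cases i with
    | zero =>
      simp only [List.getElem?_cons_zero, Option.some.injEq] at h
      subst h
      simp
    | succ i =>
      simp only [List.getElem?_cons_succ] at h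
      show ((x :: rest.set i 1).count (-1)) + 1 = _
      simp only [List.count_cons]
      have := ih i h
      omega

-- the closed form both programs compute
def CF (k d g : Int) : Int :=
  if 0 ≤ d ∧ d ≤ k then (if d % 2 = 0 then g else -g) else (if k % 2 = 0 then -2 else 2)

def cfOf (l : List Int) (depth : Int) : Int :=
  CF ((l.count (-1) : Int)) ((l.length : Int) - depth) (gVal l)

theorem gVal_bound (l : List Int) : -1 ≤ gVal l ∧ gVal l ≤ 1 := by
  rw [gVal]; split_ifs <;> omega

theorem CF_step (k d g : Int) (hk : 1 ≤ k) (hd : d ≠ 0) (hg : -1 ≤ g ∧ g ≤ 1) :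
    max (-2) (-(CF (k - 1) (d - 1) g)) = CF k d g := by
  rw [CF, CF, max_def]
  split_ifs <;> omega

theorem terminal_case (l : List Int) (depth : Int) (hdep : depth = (l.length : Int)) :
    gVal l = cfOf l depth := by
  have h0 : (l.length : Int) - depth = 0 := by omega
  rw [cfOf, CF, h0]
  have hcond : (0 : Int) ≤ 0 ∧ (0 : Int) ≤ ((l.count (-1) : Int)) := ⟨le_refl _, Int.natCast_nonneg _⟩
  rw [if_pos hcond]
  norm_num

theorem sentinel_case (l : List Int) (depth : Int) (hdep : depth ≠ (l.length : Int))
    (hc0 : l.count (-1) = 0) :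
    (-2 : Int) = cfOf l depth := by
  rw [cfOf, CF, hc0]
  rw [if_neg (by push_cast; omega), if_pos (by norm_num)]

theorem any_enum_neg1 (l : List Int) :
    ((PySem.List.enumerate l).any fun mp => decide (mp.2 = -1)) = true ↔ (-1 : Int) ∈ l := by
  rw [List.any_eq_true]
  constructor
  · rintro ⟨mp, hmp, h⟩
    rw [decide_eq_true_eq] at h
    have hmem : mp.2 ∈ (PySem.List.enumerate l).map (·.2) := List.mem_map_of_mem hmp
    rw [PySem.List.map_snd_enumerate] at hmem
    rwa [h] at hmem
  · intro hmem
    rcases List.getElem_of_mem hmem with ⟨k, hk', hkv⟩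
    exact ⟨((0 : Int) + k, -1), (PySem.List.mem_enumerate_iff _ _ _).2 ⟨k, hk', by rw [hkv]⟩, by simp⟩

theorem not_neg1_of_enum (l : List Int) (hno : (-1 : Int) ∉ l) :
    ∀ mp ∈ PySem.List.enumerate l, mp.2 ≠ -1 := by
  intro mp hmp h
  apply hno
  have hmem : mp.2 ∈ (PySem.List.enumerate l).map (·.2) := List.mem_map_of_mem hmp
  rw [PySem.List.map_snd_enumerate] at hmem
  rwa [h] at hmem

-- ===== A-side: the accumulating max-fold of A's marble loop (pure) =====
theorem fold_max_const (l : List (Int × Int)) (f : Int × Int → Int) (c r : Int)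
    (hc : ∀ mp ∈ l, mp.2 = -1 → f mp = c) :
    l.foldl (fun res mp => if mp.2 = -1 then max res (f mp) else res) r
    = if l.any (fun mp => decide (mp.2 = -1)) then max r c else r := by
  induction l generalizing r with
  | nil => simp
  | cons mp rest ih =>
    rw [List.foldl_cons]
    by_cases h : mp.2 = -1
    · rw [if_pos h, ih (max r (f mp)) (fun q hq hq2 => hc q (List.mem_cons_of_mem _ hq) hq2),
        hc mp List.mem_cons_self h,
        if_pos (show ((mp :: rest).any fun mp => decide (mp.2 = -1)) = true by simp [h])]
      by_cases hrest : rest.any (fun mp => decide (mp.2 = -1)) = true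
      · rw [if_pos hrest, max_assoc, max_self]
      · rw [if_neg hrest]
    · rw [if_neg h, ih r (fun q hq hq2 => hc q (List.mem_cons_of_mem _ hq) hq2)]
      by_cases hrest : rest.any (fun mp => decide (mp.2 = -1)) = true
      · rw [if_pos hrest, if_pos (show ((mp :: rest).any fun mp => decide (mp.2 = -1)) = true by simp [hrest])]
      · rw [if_neg hrest,
          if_neg (show ¬ ((mp :: rest).any fun mp => decide (mp.2 = -1)) = true by simp [h, hrest])]

theorem solveF_eq (fuel : Nat) : ∀ (l : List Int) (turn depth : Int),
    l.count (-1) ≤ fuel →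
    solveF fuel l turn depth = cfOf l depth := by
  induction fuel with
  | zero =>
    intro l turn depth hcount
    have hc0 : l.count (-1) = 0 := Nat.le_zero.1 hcount
    have hno : (-1 : Int) ∉ l := by
      intro h; have := List.count_pos_iff.2 h; omega
    rw [solveF]
    by_cases hdep : depth = (l.length : Int)
    · rw [if_pos hdep, gameState_eq]; exact terminal_case l depth hdep
    · rw [if_neg hdep]
      rw [fold_max_const _ _ 0 _ (fun mp hmp h => absurd h (not_neg1_of_enum l hno mp hmp))]
      rw [if_neg (fun hx => hno ((any_enum_neg1 l).1 hx))]
      exact sentinel_case l depth hdep hc0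
  | succ f ih =>
    intro l turn depth hcount
    rw [solveF]
    by_cases hdep : depth = (l.length : Int)
    · rw [if_pos hdep, gameState_eq]; exact terminal_case l depth hdep
    · rw [if_neg hdep]
      by_cases hno : (-1 : Int) ∈ l
      case neg =>
        have hc0 : l.count (-1) = 0 := by
          rcases Nat.eq_zero_or_pos (l.count (-1)) with h | h
          · exact h
          · exact absurd (List.count_pos_iff.1 h) hno
        rw [fold_max_const _ _ 0 _ (fun mp hmp h => absurd h (not_neg1_of_enum l hno mp hmp))]
        rw [if_neg (fun hx => hno ((any_enum_neg1 l).1 hx))]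
        exact sentinel_case l depth hdep hc0
      case pos =>
        have hcpos : 0 < l.count (-1) := List.count_pos_iff.2 hno
        rw [fold_max_const _ _
          (-(CF ((l.count (-1) : Int) - 1) ((l.length : Int) - depth - 1) (gVal l))) _ ?_]
        · rw [if_pos ((any_enum_neg1 l).2 hno)]
          exact CF_step _ _ _ (by omega) (by omega) (gVal_bound l)
        · intro mp hmp hp
          rcases (PySem.List.mem_enumerate_iff _ _ _).1 hmp with ⟨k, hk, hkeq⟩
          have hlk : l[k] = -1 := by rw [hkeq] at hp; simpa using hp
          have hget : l[k]? = some (-1) := by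
            rw [List.getElem?_eq_getElem hk, hlk]
          have hm1 : mp.1 = ((k : Nat) : Int) := by rw [hkeq]; simp
          show -(solveF f (PySem.List.pySetD l mp.1 1) (PySem.Int.mod (turn + 1) 2) (depth + 1)) = _
          rw [hm1, PySem.List.pySetD_natCast]
          have hcnt : (l.set k 1).count (-1) + 1 = l.count (-1) := count_set_neg1 l k hget
          rw [ih _ _ _ (by omega), cfOf]
          have e1 : (((l.set k 1).count (-1)) : Int) = ((l.count (-1) : Int)) - 1 := by
            omega
          have e2 : (((l.set k 1).length : Int)) - (depth + 1) = (l.length : Int) - depth - 1 := by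
            rw [List.length_set]; omega
          have e3 : gVal (l.set k 1) = gVal l := by
            rw [gVal, gVal, aListP_set l k hget, bListP_set l k hget]
          rw [e1, e2, e3]

-- ===== B-side: the memoized minimax =====

-- cache invariant: every entry stores the closed-form value of its key
def GoodC (c : PySem.Dict (List Int × Int) Int) : Prop :=
  ∀ (key : List Int × Int) (v : Int), PySem.Dict.get? c key = some v → v = cfOf key.1 key.2

theorem goodC_empty : GoodC PySem.Dict.empty := by
  intro key v h
  rw [PySem.Dict.get?_empty] at h
  exact absurd h (by simp)

theorem goodC_insert (c : PySem.Dict (List Int × Int) Int) (b : List Int) (d v : Int)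
    (hc : GoodC c) (hv : v = cfOf b d) :
    GoodC (PySem.Dict.insert c (b, d) v) := by
  intro key w h
  rw [PySem.Dict.get?_insert] at h
  by_cases hk : key = (b, d)
  · rw [if_pos hk] at h
    cases h
    rw [hk]
    exact hv
  · rw [if_neg hk] at h
    exact hc key w h

-- stateful version of the max-fold: the step returns a constant value and preserves Good
theorem fold_state (l : List (Int × Int))
    (step : Int × Int → PySem.Dict (List Int × Int) Int → Int × PySem.Dict (List Int × Int) Int)
    (C : Int)
    (hstep : ∀ mp ∈ l, mp.2 = -1 → ∀ c, GoodC c → (step mp c).1 = C ∧ GoodC (step mp c).2) :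
    ∀ (r : Int) (c : PySem.Dict (List Int × Int) Int), GoodC c →
    (l.foldl (fun (st : Int × PySem.Dict (List Int × Int) Int) mp =>
        if mp.2 = -1 then (max st.1 (-(step mp st.2).1), (step mp st.2).2) else st) (r, c)).1
      = (if l.any (fun mp => decide (mp.2 = -1)) then max r (-C) else r)
    ∧ GoodC (l.foldl (fun (st : Int × PySem.Dict (List Int × Int) Int) mp =>
        if mp.2 = -1 then (max st.1 (-(step mp st.2).1), (step mp st.2).2) else st) (r, c)).2 := by
  induction l with
  | nil => intro r c hc; simpa using hc
  | cons mp rest ih =>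
    intro r c hc
    rw [List.foldl_cons]
    by_cases h : mp.2 = -1
    · rw [if_pos h]
      rcases hstep mp List.mem_cons_self h c hc with ⟨hval, hgood⟩
      rw [hval]
      have := ih (fun q hq hq2 => hstep q (List.mem_cons_of_mem _ hq) hq2) (max r (-C)) _ hgood
      rcases this with ⟨h1, h2⟩
      refine ⟨?_, h2⟩
      rw [h1, if_pos (show ((mp :: rest).any fun mp => decide (mp.2 = -1)) = true by simp [h])]
      by_cases hrest : rest.any (fun mp => decide (mp.2 = -1)) = true
      · rw [if_pos hrest, max_assoc, max_self]
      · rw [if_neg hrest]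
    · rw [if_neg h]
      have := ih (fun q hq hq2 => hstep q (List.mem_cons_of_mem _ hq) hq2) r c hc
      rcases this with ⟨h1, h2⟩
      refine ⟨?_, h2⟩
      rw [h1]
      by_cases hrest : rest.any (fun mp => decide (mp.2 = -1)) = true
      · rw [if_pos hrest, if_pos (show ((mp :: rest).any fun mp => decide (mp.2 = -1)) = true by simp [hrest])]
      · rw [if_neg hrest,
          if_neg (show ¬ ((mp :: rest).any fun mp => decide (mp.2 = -1)) = true by simp [h, hrest])]

theorem goF_eq (fuel : Nat) : ∀ (l : List Int) (depth : Int)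
    (cache : PySem.Dict (List Int × Int) Int),
    l.count (-1) ≤ fuel → GoodC cache →
    (goF fuel l depth cache).1 = cfOf l depth ∧ GoodC (goF fuel l depth cache).2 := by
  induction fuel with
  | zero =>
    intro l depth cache hcount hgood
    have hc0 : l.count (-1) = 0 := Nat.le_zero.1 hcount
    have hno : (-1 : Int) ∉ l := by
      intro h; have := List.count_pos_iff.2 h; omega
    rw [goF]
    by_cases hdep : depth = (l.length : Int)
    · rw [if_pos hdep]
      exact ⟨by rw [gameStateAlt_eq_gVal]; exact terminal_case l depth hdep, hgood⟩
    · rw [if_neg hdep]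
      cases hhit : PySem.Dict.get? cache (l, depth) with
      | some v =>
        exact ⟨hgood (l, depth) v hhit, hgood⟩
      | none =>
        simp only
        have hfold := fold_state (PySem.List.enumerate l)
          (fun _ c => ((0 : Int), c)) 0
          (fun mp hmp h c hc => absurd h (not_neg1_of_enum l hno mp hmp))
          (-2) cache hgood
        rcases hfold with ⟨h1, h2⟩
        rw [if_neg (fun hx => hno ((any_enum_neg1 l).1 hx))] at h1
        refine ⟨by rw [h1]; exact sentinel_case l depth hdep hc0, ?_⟩
        exact goodC_insert _ _ _ _ h2 (by rw [h1]; exact sentinel_case l depth hdep hc0)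
  | succ f ih =>
    intro l depth cache hcount hgood
    rw [goF]
    by_cases hdep : depth = (l.length : Int)
    · rw [if_pos hdep]
      exact ⟨by rw [gameStateAlt_eq_gVal]; exact terminal_case l depth hdep, hgood⟩
    · rw [if_neg hdep]
      cases hhit : PySem.Dict.get? cache (l, depth) with
      | some v =>
        exact ⟨hgood (l, depth) v hhit, hgood⟩
      | none =>
        simp only
        by_cases hno : (-1 : Int) ∈ l
        case neg =>
          have hc0 : l.count (-1) = 0 := by
            rcases Nat.eq_zero_or_pos (l.count (-1)) with h | h
            · exact h
            · exact absurd (List.count_pos_iff.1 h) hno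
          have hfold := fold_state (PySem.List.enumerate l)
            (fun mp c => goF f (PySem.List.pySetD l mp.1 1) (depth + 1) c) 0
            (fun mp hmp h c hc => absurd h (not_neg1_of_enum l hno mp hmp))
            (-2) cache hgood
          rcases hfold with ⟨h1, h2⟩
          rw [if_neg (fun hx => hno ((any_enum_neg1 l).1 hx))] at h1
          refine ⟨by rw [h1]; exact sentinel_case l depth hdep hc0, ?_⟩
          exact goodC_insert _ _ _ _ h2 (by rw [h1]; exact sentinel_case l depth hdep hc0)
        case pos =>
          have hcpos : 0 < l.count (-1) := List.count_pos_iff.2 hno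
          have hstep : ∀ mp ∈ PySem.List.enumerate l, mp.2 = -1 →
              ∀ c, GoodC c →
              (goF f (PySem.List.pySetD l mp.1 1) (depth + 1) c).1
                = CF ((l.count (-1) : Int) - 1) ((l.length : Int) - depth - 1) (gVal l)
              ∧ GoodC (goF f (PySem.List.pySetD l mp.1 1) (depth + 1) c).2 := by
            intro mp hmp hp c hc
            rcases (PySem.List.mem_enumerate_iff _ _ _).1 hmp with ⟨k, hk, hkeq⟩
            have hlk : l[k] = -1 := by rw [hkeq] at hp; simpa using hp
            have hget : l[k]? = some (-1) := by
              rw [List.getElem?_eq_getElem hk, hlk]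
            have hm1 : mp.1 = ((k : Nat) : Int) := by rw [hkeq]; simp
            rw [hm1, PySem.List.pySetD_natCast]
            have hcnt : (l.set k 1).count (-1) + 1 = l.count (-1) := count_set_neg1 l k hget
            have := ih (l.set k 1) (depth + 1) c (by omega) hc
            rcases this with ⟨h1, h2⟩
            refine ⟨?_, h2⟩
            rw [h1, cfOf]
            have e1 : (((l.set k 1).count (-1)) : Int) = ((l.count (-1) : Int)) - 1 := by omega
            have e2 : (((l.set k 1).length : Int)) - (depth + 1) = (l.length : Int) - depth - 1 := by
              rw [List.length_set]; omega
            have e3 : gVal (l.set k 1) = gVal l := by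
              rw [gVal, gVal, aListP_set l k hget, bListP_set l k hget]
            rw [e1, e2, e3]
          have hfold := fold_state (PySem.List.enumerate l)
            (fun mp c => goF f (PySem.List.pySetD l mp.1 1) (depth + 1) c)
            (CF ((l.count (-1) : Int) - 1) ((l.length : Int) - depth - 1) (gVal l))
            hstep (-2) cache hgood
          rcases hfold with ⟨h1, h2⟩
          rw [if_pos ((any_enum_neg1 l).2 hno)] at h1
          have hres : (((PySem.List.enumerate l).foldl
              (fun (st : Int × PySem.Dict (List Int × Int) Int) mp =>
                if mp.2 = -1 then
                  (max st.1 (-(goF f (PySem.List.pySetD l mp.1 1) (depth + 1) st.2).1),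
                   (goF f (PySem.List.pySetD l mp.1 1) (depth + 1) st.2).2)
                else st) (-2, cache)).1) = cfOf l depth := by
            rw [h1, cfOf]
            exact CF_step _ _ _ (by omega) (by omega) (gVal_bound l)
          exact ⟨hres, goodC_insert _ _ _ _ h2 hres⟩

theorem solve_main (marbles : List Int) (turn depth : Int) :
    solve marbles turn depth = solve_alt marbles turn depth := by
  rw [solve, solveF_eq _ marbles turn depth (le_refl _), solve_alt,
    (goF_eq _ marbles depth PySem.Dict.empty (le_refl _) goodC_empty).1]

-- ===== VERDICT (by name: the statement is the Claim_ definition above) =====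
theorem solve_spec : Claim_equal_solve := by
  intro marbles turn depth _
  exact solve_main marbles turn depth
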